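-- pv_equiv track=rewrite | github.com/Jaeyeop-Jung/CodingTest | 코딩테스트/토마토 스파게티 2023/2.py | solution
-- ===== SOURCE A (Python) =====
-- from collections import deque
--
-- def solution(relationships, target, limit):
--     graph = [[] for _ in range(101)]
--     for i in range(len(relationships)):
--         a, b, = relationships[i]
--         graph[a].append(b)
--         graph[b].append(a)
--
--     q = deque()
--     cnt = 0
--     res = 0
--     visited = [False] * 101
--     q.append([target, 0])
--     visited[target] = True
--     while q:
--         cur, depth, = q.popleft()
--         if limit <= depth:
--             continue
--
--         for next in graph[cur]:
--             if visited[next]: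
--                 continue
--             if depth + 1 == 1:
--                 res += 5
--                 visited[next] = True
--                 q.append([next, depth + 1])
--             elif 2 <= depth + 1 <= limit:
--                 res += 10
--                 cnt += 1
--                 visited[next] = True
--                 q.append([next, depth + 1])
--     return res + cnt
-- ===== SOURCE B (Python) =====
-- def solution(relationships, target, limit):
--     # Fixed-point reachability over the raw edge list: no queue, no adjacency
--     # list, no per-node depth bookkeeping.  Round k computes the set of nodes
--     # within distance k by one read-old/write-new sweep over all edges; the
--     # answer is tallied purely from the layer sizes.
--     reach = [False] * 101
--     reach[target] = True
--     sizes = [1]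
--     while len(sizes) - 1 < limit and (len(sizes) < 2 or sizes[-1] != sizes[-2]):
--         new = reach[:]
--         for a, b in relationships:
--             if reach[a]:
--                 new[b] = True
--             if reach[b]:
--                 new[a] = True
--         reach = new
--         sizes.append(sum(reach))
--     if limit < 1:
--         return 0
--     return 5 * (sizes[1] - sizes[0]) + 11 * (sizes[-1] - sizes[1])
-- ===== Notes on version B (the rewrite author's own statement) =====
-- stated objective: alternative
-- what changed: Replaces the deque BFS with interleaved weighted counters by a fixed-point reachability iteration: each round is one read-old/write-new sweep over the raw edge list (no queue and no adjacency list are ever built), layer sizes are recorded per round, and the answer is 5*(s1-s0)+11*(s_last-s1) computed from those sizes alone.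
import Mathlib
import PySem

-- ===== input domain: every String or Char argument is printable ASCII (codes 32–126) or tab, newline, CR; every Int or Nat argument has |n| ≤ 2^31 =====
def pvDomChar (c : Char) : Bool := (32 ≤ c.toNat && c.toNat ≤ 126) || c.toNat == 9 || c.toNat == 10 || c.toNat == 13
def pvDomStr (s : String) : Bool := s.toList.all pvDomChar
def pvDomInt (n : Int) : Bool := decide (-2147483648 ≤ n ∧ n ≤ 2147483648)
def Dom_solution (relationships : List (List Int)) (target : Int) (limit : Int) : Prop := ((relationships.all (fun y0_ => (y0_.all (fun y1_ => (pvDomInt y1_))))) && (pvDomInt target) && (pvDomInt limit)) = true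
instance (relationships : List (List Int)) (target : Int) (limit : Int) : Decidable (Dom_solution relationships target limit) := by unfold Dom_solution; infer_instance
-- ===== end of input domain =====

-- B replaces A's deque BFS (interleaved weighted counters, adjacency list) by a fixed-point
-- reachability iteration over the raw edge list that records layer sizes per round and
-- tallies the answer from those sizes alone (alternative algorithm, similar cost).

-- Python list index into the 101-slot arrays: exact for -101 ≤ n ≤ 100 (negative indices wrap);
-- Python raises IndexError outside that range (excluded by Pre_solution).
def pvIdx (n : Int) : Nat := (if n < 0 then n + 101 else n).toNat

-- ===== PORT A =====
-- graph[a].append(b); graph[b].append(a).  Out-of-range ids make Python raise IndexError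
-- (excluded by Pre_solution); the guard just keeps the port total there.
def pvAddEdge (g : List (List Int)) (a b : Int) : List (List Int) :=
  if -101 ≤ a ∧ a ≤ 100 ∧ -101 ≤ b ∧ b ≤ 100 then
    let g1 := g.set (pvIdx a) (g.getD (pvIdx a) [] ++ [b])
    g1.set (pvIdx b) (g1.getD (pvIdx b) [] ++ [a])
  else g

-- rows that are not [a, b] make Python raise ValueError on unpacking (excluded by Pre_solution)
def pvBuildGraph (relationships : List (List Int)) : List (List Int) :=
  relationships.foldl
    (fun g row => match row with
      | [a, b] => pvAddEdge g a b
      | _ => g)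
    (List.replicate 101 ([] : List Int))

-- one neighbour `nv` of the popped node at depth `depth` (body of A's inner for-loop);
-- state = (visited, res, cnt, q).  The length guard is unreachable on graphs pvBuildGraph
-- builds (all stored ids are in range); it makes the termination measure manifest.
def pvStepA (depth limit : Int) (st : List Bool × Int × Int × List (Int × Int)) (nv : Int) :
    List Bool × Int × Int × List (Int × Int) :=
  let (visited, res, cnt, q) := st
  if visited.length ≤ pvIdx nv then st
  else if visited.getD (pvIdx nv) false then st
  else if depth + 1 = 1 then
    (visited.set (pvIdx nv) true, res + 5, cnt, q ++ [(nv, depth + 1)])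
  else if 2 ≤ depth + 1 ∧ depth + 1 ≤ limit then
    (visited.set (pvIdx nv) true, res + 10, cnt + 1, q ++ [(nv, depth + 1)])
  else st

def pvCountFalse (visited : List Bool) : Nat := visited.countP (fun b => !b)

theorem pvCountFalse_set (visited : List Bool) (i : Nat) (hlt : i < visited.length)
    (hf : visited[i] = false) :
    pvCountFalse (visited.set i true) + 1 = pvCountFalse visited := by
  unfold pvCountFalse
  have h1 := List.countP_set (p := fun b : Bool => !b) (l := visited) (i := i) (a := true) hlt
  simp [hf] at h1
  have h2 : 0 < visited.countP (fun b => !b) := by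
    rw [List.countP_pos_iff]
    exact ⟨visited[i], visited.getElem_mem hlt, by simp [hf]⟩
  omega

theorem pvStepA_measure (depth limit : Int) (st : List Bool × Int × Int × List (Int × Int))
    (nv : Int) :
    pvCountFalse (pvStepA depth limit st nv).1 + (pvStepA depth limit st nv).2.2.2.length ≤
      pvCountFalse st.1 + st.2.2.2.length := by
  obtain ⟨visited, res, cnt, q⟩ := st
  by_cases h1 : visited.length ≤ pvIdx nv
  · simp [pvStepA, h1]
  · have hlt : pvIdx nv < visited.length := by omega
    by_cases h2 : visited[pvIdx nv]?.getD false = true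
    · simp [pvStepA, List.getD, h1, h2]
    · have hfalse : visited[pvIdx nv]'hlt = false := by
        rw [List.getElem?_eq_getElem hlt] at h2; simpa using h2
      have hset := pvCountFalse_set visited (pvIdx nv) hlt hfalse
      by_cases h3 : depth + 1 = 1
      · simp [pvStepA, List.getD, h1, h2, h3]; omega
      · by_cases h4 : 2 ≤ depth + 1 ∧ depth < limit
        · simp [pvStepA, List.getD, h1, h2, h3, h4]; omega
        · simp [pvStepA, List.getD, h1, h2, h3, h4]

theorem pvFoldA_measure (depth limit : Int) (ns : List Int)
    (st : List Bool × Int × Int × List (Int × Int)) :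
    pvCountFalse (ns.foldl (pvStepA depth limit) st).1 +
        (ns.foldl (pvStepA depth limit) st).2.2.2.length ≤
      pvCountFalse st.1 + st.2.2.2.length := by
  induction ns generalizing st with
  | nil => exact le_refl _
  | cons nv ns ih =>
    exact le_trans (ih _) (pvStepA_measure depth limit st nv)

def pvLoopA (graph : List (List Int)) (limit : Int) (visited : List Bool) (res cnt : Int)
    (q : List (Int × Int)) : Int :=
  match q with
  | [] => res + cnt
  | (cur, depth) :: q' =>
    if limit ≤ depth then
      pvLoopA graph limit visited res cnt q'
    else
      let st := (graph.getD (pvIdx cur) []).foldl (pvStepA depth limit) (visited, res, cnt, q')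
      pvLoopA graph limit st.1 st.2.1 st.2.2.1 st.2.2.2
termination_by pvCountFalse visited + q.length
decreasing_by
  · simp only [List.length_cons]; omega
  · have := pvFoldA_measure depth limit (graph.getD (pvIdx cur) []) (visited, res, cnt, q')
    simp only [List.length_cons] at this ⊢; omega

def solution (relationships : List (List Int)) (target : Int) (limit : Int) : Int :=
  let graph := pvBuildGraph relationships
  let visited := (List.replicate 101 false).set (pvIdx target) true
  pvLoopA graph limit visited 0 0 [(target, 0)]

-- ===== PORT B =====
-- body of Source B's per-edge sweep: guards read the round's fixed `reach`, writes go to `new`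
def pvRoundStep (reach : List Bool) (new : List Bool) (row : List Int) : List Bool :=
  match row with
  | [a, b] =>
    let n1 := if reach.getD (pvIdx a) false then new.set (pvIdx b) true else new
    if reach.getD (pvIdx b) false then n1.set (pvIdx a) true else n1
  | _ => new

-- one while-loop round: new = reach[:]; one sweep over all rows
def pvRound (relationships : List (List Int)) (reach : List Bool) : List Bool :=
  relationships.foldl (pvRoundStep reach) reach

-- the while loop: runs while len(sizes)-1 < limit and the last round grew the reach set
def pvLoopAlt (relationships : List (List Int)) (limit : Int) (reach : List Bool)
    (sizes : List Int) : List Int :=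
  if h : (sizes.length : Int) - 1 < limit ∧
      (sizes.length < 2 ∨ sizes.getD (sizes.length - 1) 0 ≠ sizes.getD (sizes.length - 2) 0) then
    let new := pvRound relationships reach
    pvLoopAlt relationships limit new (sizes ++ [(new.countP id : Int)])
  else sizes
termination_by (limit - ((sizes.length : Int) - 1)).toNat
decreasing_by
  simp only [List.length_append, List.length_cons, List.length_nil]
  have := h.1
  omega

def solution_alt (relationships : List (List Int)) (target : Int) (limit : Int) : Int :=
  let reach := (List.replicate 101 false).set (pvIdx target) true
  let sizes := pvLoopAlt relationships limit reach [1]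
  if limit < 1 then 0
  else 5 * (sizes.getD 1 0 - sizes.getD 0 0) +
    11 * (sizes.getD (sizes.length - 1) 0 - sizes.getD 1 0)

-- ===== PRECONDITION & SPEC =====
-- Pre_ excludes exactly the inputs on which Python A raises: a row that is not a pair
-- (ValueError on unpacking) or a node id / target outside [-101, 100], Python's valid
-- index range for the 101-slot arrays (IndexError).
def Pre_solution (relationships : List (List Int)) (target : Int) (limit : Int) : Prop :=
  (∀ row ∈ relationships, row.length = 2 ∧ ∀ x ∈ row, -101 ≤ x ∧ x ≤ 100) ∧
    -101 ≤ target ∧ target ≤ 100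

instance (relationships : List (List Int)) (target : Int) (limit : Int) :
    Decidable (Pre_solution relationships target limit) := by
  unfold Pre_solution; infer_instance

def pvWitness_solution : List (List Int) × Int × Int := ([[0, 1], [1, 2]], 0, 2)

def Spec_solution (relationships : List (List Int)) (target : Int) (limit : Int) (out : Int) : Prop := out = solution_alt relationships target limit
instance (relationships : List (List Int)) (target : Int) (limit : Int) (out : Int) : Decidable (Spec_solution relationships target limit out) := by unfold Spec_solution; infer_instance

-- ===== CLAIM (what is proved, stated in full; the proofs are below) =====
def Claim_equal_solution : Prop := ∀ (relationships : List (List Int)) (target : Int) (limit : Int), Dom_solution relationships target limit → Pre_solution relationships target limit → Spec_solution relationships target limit (solution relationships target limit)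

-- ===== LEMMAS AND PROOFS =====

theorem pv_getD_set_self {α : Type} (l : List α) (i : Nat) (a d : α) (h : i < l.length) :
    (l.set i a).getD i d = a := by
  simp [List.getD, h]

theorem pv_getD_set_ne {α : Type} (l : List α) (i j : Nat) (a d : α) (h : i ≠ j) :
    (l.set i a).getD j d = l.getD j d := by
  simp [List.getD, List.getElem?_set_ne h]

-- the weight A's counters accumulate for a node at BFS depth x (target itself: x = 0)
def pvW (x : Int) : Int := if x = 1 then 5 else if 2 ≤ x then 11 else 0

def pvWeight (dist : List Int) : Int := (dist.map pvW).sum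

-- proof-side reference loop: level-synchronous BFS filling a distance table
def pvStepB (d : Int) (st : List Int × List Int) (v : Int) : List Int × List Int :=
  let (dist, nxt) := st
  if dist.getD (pvIdx v) 0 < 0 then (dist.set (pvIdx v) d, nxt ++ [v]) else st

def pvLev (graph : List (List Int)) (limit : Int) (dist : List Int) (frontier : List Int)
    (d : Int) : List Int :=
  if frontier ≠ [] ∧ d < limit then
    let st := frontier.foldl
      (fun st u => (graph.getD (pvIdx u) []).foldl (pvStepB (d + 1)) st) (dist, [])
    pvLev graph limit st.1 st.2 (d + 1)
  else dist
termination_by (limit - d).toNat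
decreasing_by omega

-- visited/dist correspondence
def pvCorr (visited : List Bool) (dist : List Int) : Prop :=
  visited.length = 101 ∧ dist.length = 101 ∧
    ∀ j, j < 101 → (visited.getD j false = true ↔ 0 ≤ dist.getD j 0)

theorem pvWeight_cons (x : Int) (l : List Int) : pvWeight (x :: l) = pvW x + pvWeight l := by
  simp [pvWeight]

theorem pvWeight_set (dist : List Int) (j : Nat) (x : Int) (h : j < dist.length) :
    pvWeight (dist.set j x) = pvWeight dist - pvW (dist.getD j 0) + pvW x := by
  induction dist generalizing j with
  | nil => simp at h
  | cons y l ih =>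
    cases j with
    | zero => simp [pvWeight_cons, List.getD]; ring
    | succ j =>
      have hj : j < l.length := by simpa using h
      have := ih j hj
      simp only [List.set_cons_succ, pvWeight_cons, List.getD_cons_succ]
      omega

-- one lockstep step: A's neighbour handling vs the reference level BFS, on corresponding states
theorem pv_step (depth limit : Int) (nv : Int) (visited : List Bool) (res cnt : Int)
    (dist : List Int) (nxt rest : List Int)
    (hc : pvCorr visited dist) (hw : res + cnt = pvWeight dist)
    (hd0 : 0 ≤ depth) (hdl : depth < limit) :
    let A := pvStepA depth limit
      (visited, res, cnt,
        rest.map (fun u => (u, depth)) ++ nxt.map (fun u => (u, depth + 1))) nv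
    let B := pvStepB (depth + 1) (dist, nxt) nv
    pvCorr A.1 B.1 ∧ A.2.1 + A.2.2.1 = pvWeight B.1 ∧
      A.2.2.2 = rest.map (fun u => (u, depth)) ++ B.2.map (fun u => (u, depth + 1)) := by
  obtain ⟨hvl, hdl', hcorr⟩ := hc
  by_cases h1 : (101 : Nat) ≤ pvIdx nv
  · -- out of range: both sides skip
    have hA : visited.length ≤ pvIdx nv := by omega
    have hB : dist.getD (pvIdx nv) 0 = 0 := List.getD_eq_default dist 0 (by omega)
    simp only [pvStepA, pvStepB, hB]
    rw [if_pos hA, if_neg (by omega)]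
    exact ⟨⟨hvl, hdl', hcorr⟩, hw, rfl⟩
  · have hlt : pvIdx nv < 101 := by omega
    by_cases h2 : visited.getD (pvIdx nv) false = true
    · -- already visited: both sides skip
      have hB : ¬ dist.getD (pvIdx nv) 0 < 0 := by
        have := (hcorr (pvIdx nv) hlt).mp h2; omega
      simp only [pvStepA, pvStepB]
      rw [if_neg (by omega), if_pos h2, if_neg hB]
      exact ⟨⟨hvl, hdl', hcorr⟩, hw, rfl⟩
    · -- fresh node: both sides mark it at depth+1
      have hBneg : dist.getD (pvIdx nv) 0 < 0 := by
        rcases lt_or_ge (dist.getD (pvIdx nv) 0) 0 with h | h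
        · exact h
        · exact absurd ((hcorr (pvIdx nv) hlt).mpr h) h2
      have hcorr' : pvCorr (visited.set (pvIdx nv) true) (dist.set (pvIdx nv) (depth + 1)) := by
        refine ⟨by simp [hvl], by simp [hdl'], fun j hj => ?_⟩
        by_cases hji : pvIdx nv = j
        · subst hji
          rw [pv_getD_set_self _ _ _ _ (by omega),
            pv_getD_set_self _ _ _ _ (by omega)]
          exact ⟨fun _ => by omega, fun _ => rfl⟩
        · rw [pv_getD_set_ne _ _ _ _ _ hji, pv_getD_set_ne _ _ _ _ _ hji]
          exact hcorr j hj
      have hwset : pvWeight (dist.set (pvIdx nv) (depth + 1))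
          = pvWeight dist + pvW (depth + 1) := by
        rw [pvWeight_set dist (pvIdx nv) (depth + 1) (by omega)]
        have : pvW (dist.getD (pvIdx nv) 0) = 0 := by
          unfold pvW; rw [if_neg (by omega), if_neg (by omega)]
        omega
      have hq : (rest.map (fun u => (u, depth)) ++ nxt.map (fun u => (u, depth + 1)))
            ++ [(nv, depth + 1)]
          = rest.map (fun u => (u, depth)) ++ (nxt ++ [nv]).map (fun u => (u, depth + 1)) := by
        simp
      by_cases h3 : depth + 1 = 1
      · have hW : pvW (depth + 1) = 5 := by unfold pvW; rw [if_pos h3]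
        simp only [pvStepA, pvStepB]
        rw [if_neg (by omega), if_neg h2, if_pos h3, if_pos hBneg]
        exact ⟨hcorr', by dsimp only; omega, hq⟩
      · have h4 : 2 ≤ depth + 1 ∧ depth + 1 ≤ limit := by omega
        have hW : pvW (depth + 1) = 11 := by unfold pvW; rw [if_neg h3, if_pos h4.1]
        simp only [pvStepA, pvStepB]
        rw [if_neg (by omega), if_neg h2, if_neg h3, if_pos h4, if_pos hBneg]
        exact ⟨hcorr', by dsimp only; omega, hq⟩

theorem pv_inner (depth limit : Int) (ns : List Int) :
    ∀ (visited : List Bool) (res cnt : Int) (dist : List Int) (nxt rest : List Int),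
      pvCorr visited dist → res + cnt = pvWeight dist → 0 ≤ depth → depth < limit →
      let A := ns.foldl (pvStepA depth limit)
        (visited, res, cnt,
          rest.map (fun u => (u, depth)) ++ nxt.map (fun u => (u, depth + 1)))
      let B := ns.foldl (pvStepB (depth + 1)) (dist, nxt)
      pvCorr A.1 B.1 ∧ A.2.1 + A.2.2.1 = pvWeight B.1 ∧
        A.2.2.2 = rest.map (fun u => (u, depth)) ++ B.2.map (fun u => (u, depth + 1)) := by
  induction ns with
  | nil =>
    intro visited res cnt dist nxt rest hc hw hd0 hdl
    exact ⟨hc, hw, rfl⟩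
  | cons nv ns ih =>
    intro visited res cnt dist nxt rest hc hw hd0 hdl
    obtain ⟨hc1, hw1, hq1⟩ := pv_step depth limit nv visited res cnt dist nxt rest hc hw hd0 hdl
    simp only [List.foldl_cons]
    have hSA : pvStepA depth limit
        (visited, res, cnt,
          rest.map (fun u => (u, depth)) ++ nxt.map (fun u => (u, depth + 1))) nv
      = ((pvStepA depth limit
            (visited, res, cnt,
              rest.map (fun u => (u, depth)) ++ nxt.map (fun u => (u, depth + 1))) nv).1,
         (pvStepA depth limit
            (visited, res, cnt,
              rest.map (fun u => (u, depth)) ++ nxt.map (fun u => (u, depth + 1))) nv).2.1,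
         (pvStepA depth limit
            (visited, res, cnt,
              rest.map (fun u => (u, depth)) ++ nxt.map (fun u => (u, depth + 1))) nv).2.2.1,
         rest.map (fun u => (u, depth)) ++
           ((pvStepB (depth + 1) (dist, nxt) nv).2).map (fun u => (u, depth + 1))) := by
      rw [← hq1]
    rw [hSA]
    exact ih _ _ _ (pvStepB (depth + 1) (dist, nxt) nv).1
      (pvStepB (depth + 1) (dist, nxt) nv).2 rest hc1 hw1 hd0 hdl

theorem pv_level (graph : List (List Int)) (limit depth : Int) (rest : List Int) :
    ∀ (visited : List Bool) (res cnt : Int) (dist : List Int) (nxt : List Int),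
      pvCorr visited dist → res + cnt = pvWeight dist → 0 ≤ depth → depth < limit →
      let FB := rest.foldl
        (fun st u => (graph.getD (pvIdx u) []).foldl (pvStepB (depth + 1)) st) (dist, nxt)
      ∃ visited' res' cnt',
        pvLoopA graph limit visited res cnt
            (rest.map (fun u => (u, depth)) ++ nxt.map (fun u => (u, depth + 1)))
          = pvLoopA graph limit visited' res' cnt' (FB.2.map (fun u => (u, depth + 1)))
        ∧ pvCorr visited' FB.1 ∧ res' + cnt' = pvWeight FB.1 := by
  induction rest with
  | nil =>
    intro visited res cnt dist nxt hc hw hd0 hdl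
    exact ⟨visited, res, cnt, by simp, hc, hw⟩
  | cons u rest' ih =>
    intro visited res cnt dist nxt hc hw hd0 hdl
    obtain ⟨hcA, hwA, hqA⟩ := pv_inner depth limit (graph.getD (pvIdx u) [])
      visited res cnt dist nxt rest' hc hw hd0 hdl
    obtain ⟨v', r', c', heq, hc', hw'⟩ := ih
      ((graph.getD (pvIdx u) []).foldl (pvStepA depth limit)
        (visited, res, cnt,
          rest'.map (fun u => (u, depth)) ++ nxt.map (fun u => (u, depth + 1)))).1
      ((graph.getD (pvIdx u) []).foldl (pvStepA depth limit)
        (visited, res, cnt,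
          rest'.map (fun u => (u, depth)) ++ nxt.map (fun u => (u, depth + 1)))).2.1
      ((graph.getD (pvIdx u) []).foldl (pvStepA depth limit)
        (visited, res, cnt,
          rest'.map (fun u => (u, depth)) ++ nxt.map (fun u => (u, depth + 1)))).2.2.1
      ((graph.getD (pvIdx u) []).foldl (pvStepB (depth + 1)) (dist, nxt)).1
      ((graph.getD (pvIdx u) []).foldl (pvStepB (depth + 1)) (dist, nxt)).2
      hcA hwA hd0 hdl
    refine ⟨v', r', c', ?_, hc', hw'⟩
    rw [List.map_cons, List.cons_append, pvLoopA, if_neg (not_le.mpr hdl)]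
    simp only []
    rw [hqA, heq]
    rfl

theorem pvLoopA_skip (graph : List (List Int)) (limit : Int) (visited : List Bool)
    (res cnt : Int) (q : List (Int × Int)) (h : ∀ p ∈ q, limit ≤ p.2) :
    pvLoopA graph limit visited res cnt q = res + cnt := by
  induction q with
  | nil => rw [pvLoopA]
  | cons p q' ih =>
    obtain ⟨c, dep⟩ := p
    rw [pvLoopA, if_pos (h (c, dep) List.mem_cons_self)]
    exact ih (fun p hp => h p (List.mem_cons_of_mem _ hp))

theorem pv_main (graph : List (List Int)) (limit : Int) :
    ∀ (fuel : Nat) (d : Int) (frontier : List Int) (visited : List Bool) (res cnt : Int)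
      (dist : List Int), (limit - d).toNat = fuel → 0 ≤ d →
      pvCorr visited dist → res + cnt = pvWeight dist →
      pvLoopA graph limit visited res cnt (frontier.map (fun u => (u, d)))
        = pvWeight (pvLev graph limit dist frontier d) := by
  intro fuel
  induction fuel using Nat.strong_induction_on with
  | _ fuel ihf =>
    intro d frontier visited res cnt dist hfuel hd0 hc hw
    by_cases hdl : d < limit
    · rw [pvLev]
      by_cases hfr : frontier = []
      · subst hfr
        rw [if_neg (by simp)]
        simp only [List.map_nil]
        rw [pvLoopA]
        exact hw
      · rw [if_pos ⟨hfr, hdl⟩]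
        obtain ⟨v', r', c', heq, hc', hw'⟩ :=
          pv_level graph limit d frontier visited res cnt dist [] hc hw hd0 hdl
        simp only [List.map_nil, List.append_nil] at heq
        rw [heq]
        simp only []
        exact ihf ((limit - (d + 1)).toNat) (by omega) (d + 1) _ v' r' c' _ rfl (by omega)
          hc' hw'
    · rw [pvLev, if_neg (fun h => hdl h.2)]
      rw [pvLoopA_skip graph limit visited res cnt _ ?_]
      · exact hw
      · intro p hp
        obtain ⟨u, _, rfl⟩ := List.mem_map.mp hp
        omega

theorem pv_tally (dist : List Int) :
    5 * (dist.countP (fun x => x == 1) : Int) + 11 * (dist.countP (fun x => 2 ≤ x) : Int)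
      = pvWeight dist := by
  induction dist with
  | nil => simp [pvWeight]
  | cons x l ih =>
    simp only [pvWeight_cons, List.countP_cons]
    by_cases hx1 : x = 1
    · norm_num [pvW, hx1]; push_cast at ih ⊢; omega
    · by_cases hx2 : 2 ≤ x
      · norm_num [pvW, hx1, hx2]; push_cast at ih ⊢; omega
      · norm_num [pvW, hx1, hx2]; push_cast at ih ⊢; omega


-- ---------- small utilities ----------

def pvReachOf (dist : List Int) : List Bool := dist.map (fun x => decide (0 ≤ x))

theorem pvReachOf_length (dist : List Int) : (pvReachOf dist).length = dist.length := by
  simp [pvReachOf]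

theorem pvReachOf_getD_lt (dist : List Int) (j : Nat) (h : j < dist.length) :
    (pvReachOf dist).getD j false = decide (0 ≤ dist.getD j 0) := by
  rw [List.getD_eq_getElem _ _ (by simpa [pvReachOf] using h),
    List.getD_eq_getElem _ _ h]
  simp [pvReachOf]

theorem pvReachOf_getD_ge (dist : List Int) (j : Nat) (h : dist.length ≤ j) :
    (pvReachOf dist).getD j false = false :=
  List.getD_eq_default _ _ (by simpa [pvReachOf] using h)

theorem pv_ext_getD (l1 l2 : List Bool) (hl : l1.length = l2.length)
    (h : ∀ j, l1.getD j false = l2.getD j false) : l1 = l2 := by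
  apply List.ext_getElem hl
  intro i h1 h2
  have := h i
  rwa [List.getD_eq_getElem _ _ h1, List.getD_eq_getElem _ _ h2] at this

theorem pvIdx_lt (x : Int) (h1 : -101 ≤ x) (h2 : x ≤ 100) : pvIdx x < 101 := by
  unfold pvIdx
  split <;> omega

-- pointwise comparison of two countP's over same-length lists
theorem pv_countP_pointwise (p q : Int → Bool) :
    ∀ (l1 l2 : List Int), l1.length = l2.length →
      (∀ i (h1 : i < l1.length) (h2 : i < l2.length), p l1[i] = q l2[i]) →
      l1.countP p = l2.countP q := by
  intro l1
  induction l1 with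
  | nil => intro l2 hl _; cases l2 with
    | nil => rfl
    | cons _ _ => simp at hl
  | cons x l ih =>
    intro l2 hl h
    cases l2 with
    | nil => simp at hl
    | cons y l2' =>
      have h0 := h 0 (by simp) (by simp)
      simp only [List.getElem_cons_zero] at h0
      simp only [List.countP_cons, h0,
        ih l2' (by simpa using hl) (fun i hi1 hi2 => by
          have := h (i + 1) (by simpa using hi1) (by simpa using hi2)
          simpa using this)]

-- countP split along a disjoint union of predicates
theorem pv_countP_split (p q r : Int → Bool) (hpq : ∀ x, p x = (q x || r x))
    (hdisj : ∀ x, ¬(q x = true ∧ r x = true)) (l : List Int) :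
    l.countP p = l.countP q + l.countP r := by
  induction l with
  | nil => simp
  | cons x l ih =>
    simp only [List.countP_cons, hpq x, ih]
    by_cases hq : q x = true
    · have hr : r x = false := by
        have := hdisj x
        cases hx : r x
        · rfl
        · exact absurd ⟨hq, hx⟩ this
      simp [hq, hr]; omega
    · simp only [Bool.not_eq_true] at hq
      simp [hq]
      by_cases hr : r x = true <;> simp [hr] <;> omega

theorem pv_countP_lt (p q : Int → Bool) (l : List Int) (x : Int) (hx : x ∈ l)
    (hqx : q x = false) (hpx : p x = true) (himp : ∀ y, q y = true → p y = true) :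
    l.countP q < l.countP p := by
  induction l with
  | nil => simp at hx
  | cons y l ih =>
    have hle : ∀ (m : List Int), m.countP q ≤ m.countP p :=
      fun m => List.countP_mono_left (fun a _ ha => himp a ha)
    rcases List.mem_cons.mp hx with rfl | hmem
    · simp only [List.countP_cons, hqx, hpx]
      have := hle l
      simp; omega
    · have := ih hmem
      simp only [List.countP_cons]
      by_cases hqy : q y = true
      · simp [hqy, himp y hqy]; omega
      · simp only [Bool.not_eq_true] at hqy
        simp [hqy]
        by_cases hpy : p y = true <;> simp [hpy] <;> omega


-- ---------- characterization of one level of the reference BFS ----------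

theorem pv_foldB_len (d : Int) (ns : List Int) :
    ∀ (st : List Int × List Int), (ns.foldl (pvStepB d) st).1.length = st.1.length := by
  induction ns with
  | nil => intro st; rfl
  | cons v ns ih =>
    intro st
    rw [List.foldl_cons, ih]
    obtain ⟨dist, nxt⟩ := st
    by_cases h : dist.getD (pvIdx v) 0 < 0
    · have hstep : pvStepB d (dist, nxt) v = (dist.set (pvIdx v) d, nxt ++ [v]) := by
        simp only [pvStepB, if_pos h]
      rw [hstep]; simp
    · have hstep : pvStepB d (dist, nxt) v = (dist, nxt) := by
        simp only [pvStepB, if_neg h]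
      rw [hstep]

theorem pv_foldB_prefix (d : Int) (ns : List Int) :
    ∀ (st : List Int × List Int), ∃ t, (ns.foldl (pvStepB d) st).2 = st.2 ++ t := by
  induction ns with
  | nil => intro st; exact ⟨[], by simp⟩
  | cons v ns ih =>
    intro st
    rw [List.foldl_cons]
    obtain ⟨dist, nxt⟩ := st
    by_cases h : dist.getD (pvIdx v) 0 < 0
    · obtain ⟨t, ht⟩ := ih (dist.set (pvIdx v) d, nxt ++ [v])
      refine ⟨v :: t, ?_⟩
      have hstep : pvStepB d (dist, nxt) v = (dist.set (pvIdx v) d, nxt ++ [v]) := by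
        simp only [pvStepB, if_pos h]
      rw [hstep, ht]
      simp
    · obtain ⟨t, ht⟩ := ih (dist, nxt)
      refine ⟨t, ?_⟩
      have hstep : pvStepB d (dist, nxt) v = (dist, nxt) := by
        simp only [pvStepB, if_neg h]
      rw [hstep, ht]

theorem pv_foldB_getD (d : Int) (hd : 0 < d) (ns : List Int) :
    ∀ (dist nxt : List Int) (j : Nat),
      (ns.foldl (pvStepB d) (dist, nxt)).1.getD j 0 =
        if 0 ≤ dist.getD j 0 then dist.getD j 0
        else if ∃ v ∈ ns, pvIdx v = j then d else dist.getD j 0 := by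
  induction ns with
  | nil =>
    intro dist nxt j
    simp only [List.foldl_nil]
    split_ifs with h1 h2
    · rfl
    · simp at h2
    · rfl
  | cons v ns ih =>
    intro dist nxt j
    rw [List.foldl_cons]
    by_cases hv : dist.getD (pvIdx v) 0 < 0
    · have hvr : pvIdx v < dist.length := by
        by_contra hge
        rw [List.getD_eq_default _ _ (by omega)] at hv
        omega
      simp only [pvStepB, if_pos hv]
      rw [ih]
      by_cases hj : pvIdx v = j
      · subst hj
        rw [pv_getD_set_self _ _ _ _ hvr]
        rw [if_pos (by omega), if_neg (by omega),
          if_pos ⟨v, List.mem_cons_self, rfl⟩]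
      · rw [pv_getD_set_ne _ _ _ _ _ hj]
        by_cases h0 : 0 ≤ dist.getD j 0
        · rw [if_pos h0, if_pos h0]
        · rw [if_neg h0, if_neg h0]
          by_cases hex : ∃ w ∈ ns, pvIdx w = j
          · rw [if_pos hex, if_pos ⟨hex.choose, List.mem_cons_of_mem _ hex.choose_spec.1,
              hex.choose_spec.2⟩]
          · rw [if_neg hex, if_neg ?_]
            rintro ⟨w, hw, rfl⟩
            rcases List.mem_cons.mp hw with rfl | hw'
            · exact hj rfl
            · exact hex ⟨w, hw', rfl⟩
    · simp only [pvStepB, if_neg hv]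
      rw [ih]
      by_cases h0 : 0 ≤ dist.getD j 0
      · rw [if_pos h0, if_pos h0]
      · rw [if_neg h0, if_neg h0]
        by_cases hex : ∃ w ∈ ns, pvIdx w = j
        · rw [if_pos hex, if_pos ⟨hex.choose, List.mem_cons_of_mem _ hex.choose_spec.1,
            hex.choose_spec.2⟩]
        · rw [if_neg hex, if_neg ?_]
          rintro ⟨w, hw, rfl⟩
          rcases List.mem_cons.mp hw with rfl | hw'
          · exact absurd (by omega : 0 ≤ dist.getD (pvIdx w) 0) h0
          · exact hex ⟨w, hw', rfl⟩

theorem pv_foldB_front_val (d : Int) (hd : 0 < d) (ns : List Int) :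
    ∀ (dist nxt : List Int),
      (∀ u ∈ nxt, (dist.getD (pvIdx u) 0 = d)) →
      ∀ u ∈ (ns.foldl (pvStepB d) (dist, nxt)).2,
        (ns.foldl (pvStepB d) (dist, nxt)).1.getD (pvIdx u) 0 = d := by
  induction ns with
  | nil =>
    intro dist nxt hnxt u hu
    exact hnxt u hu
  | cons v ns ih =>
    intro dist nxt hnxt
    rw [List.foldl_cons]
    by_cases hv : dist.getD (pvIdx v) 0 < 0
    · have hvr : pvIdx v < dist.length := by
        by_contra hge
        rw [List.getD_eq_default _ _ (by omega)] at hv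
        omega
      simp only [pvStepB, if_pos hv]
      apply ih
      intro u hu
      rcases List.mem_append.mp hu with hu' | hu'
      · by_cases hj : pvIdx v = pvIdx u
        · rw [← hj, pv_getD_set_self _ _ _ _ hvr]
        · rw [pv_getD_set_ne _ _ _ _ _ hj]
          exact hnxt u hu'
      · rcases List.mem_singleton.mp hu' with rfl
        rw [pv_getD_set_self _ _ _ _ hvr]
    · simp only [pvStepB, if_neg hv]
      exact ih dist nxt hnxt

theorem pv_foldB_front_cover (d : Int) (hd : 0 < d) (ns : List Int) :
    ∀ (dist nxt : List Int) (j : Nat),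
      (ns.foldl (pvStepB d) (dist, nxt)).1.getD j 0 = d →
      dist.getD j 0 = d ∨ ∃ u ∈ (ns.foldl (pvStepB d) (dist, nxt)).2, pvIdx u = j := by
  induction ns with
  | nil =>
    intro dist nxt j h
    exact Or.inl h
  | cons v ns ih =>
    intro dist nxt j h
    rw [List.foldl_cons] at h ⊢
    by_cases hv : dist.getD (pvIdx v) 0 < 0
    · have hvr : pvIdx v < dist.length := by
        by_contra hge
        rw [List.getD_eq_default _ _ (by omega)] at hv
        omega
      simp only [pvStepB, if_pos hv] at h ⊢
      rcases ih _ _ _ h with h1 | h1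
      · by_cases hj : pvIdx v = j
        · subst hj
          obtain ⟨t, ht⟩ := pv_foldB_prefix d ns (dist.set (pvIdx v) d, nxt ++ [v])
          refine Or.inr ⟨v, ?_, rfl⟩
          rw [ht]
          simp
        · rw [pv_getD_set_ne _ _ _ _ _ hj] at h1
          exact Or.inl h1
      · exact Or.inr h1
    · simp only [pvStepB, if_neg hv] at h ⊢
      exact ih _ _ _ h


-- ---------- the whole level fold (over the frontier) ----------

theorem pv_lfold_len (graph : List (List Int)) (d : Int) (F : List Int) :
    ∀ (st : List Int × List Int),
      (F.foldl (fun st u => (graph.getD (pvIdx u) []).foldl (pvStepB d) st) st).1.length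
        = st.1.length := by
  induction F with
  | nil => intro st; rfl
  | cons u F ih =>
    intro st
    rw [List.foldl_cons, ih, pv_foldB_len]

theorem pv_lfold_prefix (graph : List (List Int)) (d : Int) (F : List Int) :
    ∀ (st : List Int × List Int),
      ∃ t, (F.foldl (fun st u => (graph.getD (pvIdx u) []).foldl (pvStepB d) st) st).2
        = st.2 ++ t := by
  induction F with
  | nil => intro st; exact ⟨[], by simp⟩
  | cons u F ih =>
    intro st
    rw [List.foldl_cons]
    obtain ⟨t1, ht1⟩ := pv_foldB_prefix d (graph.getD (pvIdx u) []) st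
    obtain ⟨t2, ht2⟩ := ih ((graph.getD (pvIdx u) []).foldl (pvStepB d) st)
    exact ⟨t1 ++ t2, by rw [ht2, ht1, List.append_assoc]⟩

theorem pv_lfold_getD (graph : List (List Int)) (d : Int) (hd : 0 < d) (F : List Int) :
    ∀ (dist nxt : List Int) (j : Nat),
      (F.foldl (fun st u => (graph.getD (pvIdx u) []).foldl (pvStepB d) st) (dist, nxt)).1.getD j 0
        = if 0 ≤ dist.getD j 0 then dist.getD j 0
          else if ∃ u ∈ F, ∃ v ∈ graph.getD (pvIdx u) [], pvIdx v = j then d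
          else dist.getD j 0 := by
  induction F with
  | nil =>
    intro dist nxt j
    simp only [List.foldl_nil]
    split_ifs with h1 h2
    · rfl
    · simp at h2
    · rfl
  | cons u F ih =>
    intro dist nxt j
    rw [List.foldl_cons]
    have hst : ((graph.getD (pvIdx u) []).foldl (pvStepB d) (dist, nxt))
        = (((graph.getD (pvIdx u) []).foldl (pvStepB d) (dist, nxt)).1,
           ((graph.getD (pvIdx u) []).foldl (pvStepB d) (dist, nxt)).2) := rfl
    rw [hst, ih]
    rw [pv_foldB_getD d hd]
    by_cases h0 : 0 ≤ dist.getD j 0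
    · simp only [if_pos h0]
    · by_cases h1 : ∃ v ∈ graph.getD (pvIdx u) [], pvIdx v = j
      · have hex : ∃ w ∈ u :: F, ∃ v ∈ graph.getD (pvIdx w) [], pvIdx v = j :=
          ⟨u, List.mem_cons_self, h1⟩
        simp only [if_pos h1, if_neg h0, if_pos hd.le, if_pos hex]
      · by_cases h2 : ∃ w ∈ F, ∃ v ∈ graph.getD (pvIdx w) [], pvIdx v = j
        · have hex2 : ∃ w ∈ u :: F, ∃ v ∈ graph.getD (pvIdx w) [], pvIdx v = j := by
            obtain ⟨w, hw, hv⟩ := h2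
            exact ⟨w, List.mem_cons_of_mem _ hw, hv⟩
          simp only [if_neg h1, if_neg h0, if_pos h2, if_pos hex2]
        · have hex3 : ¬∃ w ∈ u :: F, ∃ v ∈ graph.getD (pvIdx w) [], pvIdx v = j := by
            rintro ⟨w, hw, hv⟩
            rcases List.mem_cons.mp hw with rfl | hw'
            · exact h1 hv
            · exact h2 ⟨w, hw', hv⟩
          simp only [if_neg h1, if_neg h0, if_neg h2, if_neg hex3]

theorem pv_lfold_front_val (graph : List (List Int)) (d : Int) (hd : 0 < d) (F : List Int) :
    ∀ (dist nxt : List Int),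
      (∀ u ∈ nxt, dist.getD (pvIdx u) 0 = d) →
      ∀ u ∈ (F.foldl (fun st u => (graph.getD (pvIdx u) []).foldl (pvStepB d) st) (dist, nxt)).2,
        (F.foldl (fun st u => (graph.getD (pvIdx u) []).foldl (pvStepB d) st) (dist, nxt)).1.getD
          (pvIdx u) 0 = d := by
  induction F with
  | nil =>
    intro dist nxt hnxt u hu
    exact hnxt u hu
  | cons w F ih =>
    intro dist nxt hnxt
    rw [List.foldl_cons]
    have hst : ((graph.getD (pvIdx w) []).foldl (pvStepB d) (dist, nxt))
        = (((graph.getD (pvIdx w) []).foldl (pvStepB d) (dist, nxt)).1,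
           ((graph.getD (pvIdx w) []).foldl (pvStepB d) (dist, nxt)).2) := rfl
    rw [hst]
    apply ih
    intro u hu
    have := pv_foldB_front_val d hd (graph.getD (pvIdx w) []) dist nxt hnxt u hu
    exact this

theorem pv_lfold_front_cover (graph : List (List Int)) (d : Int) (hd : 0 < d) (F : List Int) :
    ∀ (dist nxt : List Int) (j : Nat),
      (F.foldl (fun st u => (graph.getD (pvIdx u) []).foldl (pvStepB d) st) (dist, nxt)).1.getD j 0
          = d →
      dist.getD j 0 = d ∨
        ∃ u ∈ (F.foldl (fun st u => (graph.getD (pvIdx u) []).foldl (pvStepB d) st)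
          (dist, nxt)).2, pvIdx u = j := by
  induction F with
  | nil =>
    intro dist nxt j h
    exact Or.inl h
  | cons w F ih =>
    intro dist nxt j h
    rw [List.foldl_cons] at h ⊢
    have hst : ((graph.getD (pvIdx w) []).foldl (pvStepB d) (dist, nxt))
        = (((graph.getD (pvIdx w) []).foldl (pvStepB d) (dist, nxt)).1,
           ((graph.getD (pvIdx w) []).foldl (pvStepB d) (dist, nxt)).2) := rfl
    rw [hst] at h ⊢
    rcases ih _ _ _ h with h1 | h1
    · rcases pv_foldB_front_cover d hd (graph.getD (pvIdx w) []) dist nxt j h1 with h2 | h2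
      · exact Or.inl h2
      · obtain ⟨u, hu, rfl⟩ := h2
        obtain ⟨t, ht⟩ := pv_lfold_prefix graph d F
          ((graph.getD (pvIdx w) []).foldl (pvStepB d) (dist, nxt))
        refine Or.inr ⟨u, ?_, rfl⟩
        rw [hst] at ht
        rw [ht]
        exact List.mem_append_left _ hu
    · exact Or.inr h1

theorem pv_lev_len (graph : List (List Int)) (limit : Int) :
    ∀ (fuel : Nat) (d : Int) (dist F : List Int), (limit - d).toNat = fuel →
      (pvLev graph limit dist F d).length = dist.length := by
  intro fuel
  induction fuel using Nat.strong_induction_on with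
  | _ fuel ihf =>
    intro d dist F hfuel
    rw [pvLev]
    by_cases hc : F ≠ [] ∧ d < limit
    · rw [if_pos hc]
      rw [ihf ((limit - (d + 1)).toNat) (by omega) (d + 1) _ _ rfl]
      exact pv_lfold_len graph (d + 1) F (dist, [])
    · rw [if_neg hc]

-- pvLev only changes negative cells, and gives them values above the entry depth
theorem pv_lev_mono (graph : List (List Int)) (limit : Int) :
    ∀ (fuel : Nat) (d : Int) (dist F : List Int), (limit - d).toNat = fuel → 0 ≤ d →
      ∀ j : Nat,
        (0 ≤ dist.getD j 0 → (pvLev graph limit dist F d).getD j 0 = dist.getD j 0) ∧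
        (dist.getD j 0 < 0 →
          (pvLev graph limit dist F d).getD j 0 < 0 ∨ d < (pvLev graph limit dist F d).getD j 0) := by
  intro fuel
  induction fuel using Nat.strong_induction_on with
  | _ fuel ihf =>
    intro d dist F hfuel hd0 j
    rw [pvLev]
    by_cases hc : F ≠ [] ∧ d < limit
    · rw [if_pos hc]
      simp only []
      have hd1 : (0:Int) < d + 1 := by omega
      have hchar := pv_lfold_getD graph (d + 1) hd1 F dist [] j
      have hih := ihf ((limit - (d + 1)).toNat) (by clear hchar; omega) (d + 1)
        (F.foldl (fun st u => (graph.getD (pvIdx u) []).foldl (pvStepB (d + 1)) st) (dist, [])).1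
        (F.foldl (fun st u => (graph.getD (pvIdx u) []).foldl (pvStepB (d + 1)) st) (dist, [])).2
        rfl (by clear hchar; omega) j
      constructor
      · intro h0
        rw [if_pos h0] at hchar
        rw [hih.1 (by rw [hchar]; exact h0), hchar]
      · intro hneg
        rw [if_neg (by omega)] at hchar
        by_cases hex : ∃ u ∈ F, ∃ v ∈ graph.getD (pvIdx u) [], pvIdx v = j
        · rw [if_pos hex] at hchar
          right
          have h1 := hih.1 (by rw [hchar]; omega)
          rw [h1, hchar]
          omega
        · rw [if_neg hex] at hchar
          rcases hih.2 (by rw [hchar]; exact hneg) with h | h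
          · exact Or.inl h
          · right; omega
    · rw [if_neg hc]
      exact ⟨fun _ => rfl, fun h => Or.inl h⟩


-- ---------- adjacency list vs raw edge list ----------

theorem pvAddEdge_len (g : List (List Int)) (a b : Int) :
    (pvAddEdge g a b).length = g.length := by
  unfold pvAddEdge
  split <;> simp

theorem pvAddEdge_mem (g : List (List Int)) (a b : Int) (hlen : g.length = 101)
    (ha : -101 ≤ a ∧ a ≤ 100) (hb : -101 ≤ b ∧ b ≤ 100) (i : Nat) (v : Int) :
    v ∈ (pvAddEdge g a b).getD i [] ↔
      v ∈ g.getD i [] ∨ (pvIdx a = i ∧ v = b) ∨ (pvIdx b = i ∧ v = a) := by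
  have hia : pvIdx a < g.length := by rw [hlen]; exact pvIdx_lt a ha.1 ha.2
  have hib : pvIdx b < g.length := by rw [hlen]; exact pvIdx_lt b hb.1 hb.2
  unfold pvAddEdge
  rw [if_pos ⟨ha.1, ha.2, hb.1, hb.2⟩]
  simp only []
  by_cases hbi : pvIdx b = i
  · subst hbi
    rw [pv_getD_set_self _ _ _ _ (by simpa using hib)]
    by_cases hab : pvIdx a = pvIdx b
    · rw [← hab, pv_getD_set_self _ _ _ _ hia]
      simp [hab, or_assoc]
    · rw [pv_getD_set_ne _ _ _ _ _ hab]
      simp [hab]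
      try tauto
  · rw [pv_getD_set_ne _ _ _ _ _ hbi]
    by_cases hai : pvIdx a = i
    · subst hai
      rw [pv_getD_set_self _ _ _ _ hia]
      simp [hbi]
      try tauto
    · rw [pv_getD_set_ne _ _ _ _ _ hai]
      simp [hai, hbi]

theorem pv_graph_aux (rows : List (List Int)) :
    ∀ (g : List (List Int)), g.length = 101 →
      (∀ row ∈ rows, row.length = 2 ∧ ∀ x ∈ row, -101 ≤ x ∧ x ≤ 100) →
      ∀ (i : Nat) (v : Int),
        v ∈ (rows.foldl (fun g row => match row with | [a, b] => pvAddEdge g a b | _ => g)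
              g).getD i [] ↔
          v ∈ g.getD i [] ∨
            ∃ a b, [a, b] ∈ rows ∧ ((pvIdx a = i ∧ v = b) ∨ (pvIdx b = i ∧ v = a)) := by
  induction rows with
  | nil =>
    intro g hlen hpre i v
    simp
  | cons row rows ih =>
    intro g hlen hpre i v
    obtain ⟨hsh, hrg⟩ := hpre row List.mem_cons_self
    obtain ⟨a, b, rfl⟩ : ∃ a b, row = [a, b] := by
      match row, hsh with
      | [a, b], _ => exact ⟨a, b, rfl⟩
    rw [List.foldl_cons]
    have ha := hrg a (by simp)
    have hb := hrg b (by simp)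
    rw [ih (pvAddEdge g a b) (by rw [pvAddEdge_len, hlen])
      (fun r hr => hpre r (List.mem_cons_of_mem _ hr)) i v]
    rw [pvAddEdge_mem g a b hlen ha hb i v]
    constructor
    · rintro ((h | h | h) | ⟨a', b', hmem, h⟩)
      · exact Or.inl h
      · exact Or.inr ⟨a, b, List.mem_cons_self, Or.inl h⟩
      · exact Or.inr ⟨a, b, List.mem_cons_self, Or.inr h⟩
      · exact Or.inr ⟨a', b', List.mem_cons_of_mem _ hmem, h⟩
    · rintro (h | ⟨a', b', hmem, h⟩)
      · exact Or.inl (Or.inl h)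
      · rcases List.mem_cons.mp hmem with heq | hmem'
        · obtain ⟨rfl, rfl⟩ : a' = a ∧ b' = b := by
            injection heq with h1 h2
            injection h2 with h3 h4
            exact ⟨h1, h3⟩
          exact Or.inl (Or.inr h)
        · exact Or.inr ⟨a', b', hmem', h⟩

theorem pv_graph_mem (rows : List (List Int))
    (hpre : ∀ row ∈ rows, row.length = 2 ∧ ∀ x ∈ row, -101 ≤ x ∧ x ≤ 100)
    (i : Nat) (v : Int) :
    v ∈ (pvBuildGraph rows).getD i [] ↔
      ∃ a b, [a, b] ∈ rows ∧ ((pvIdx a = i ∧ v = b) ∨ (pvIdx b = i ∧ v = a)) := by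
  unfold pvBuildGraph
  have hrep : (List.replicate 101 ([] : List Int)).getD i [] = [] := by
    by_cases hi : i < 101
    · exact List.getD_replicate _ hi
    · exact List.getD_eq_default _ _ (by simpa using not_lt.mp hi)
  rw [pv_graph_aux rows (List.replicate 101 []) (by simp) hpre i v, hrep]
  simp

-- ---------- characterization of one round of B's edge-sweep ----------

theorem pv_roundstep_len (reach : List Bool) (new : List Bool) (row : List Int) :
    (pvRoundStep reach new row).length = new.length := by
  unfold pvRoundStep
  match row with
  | [] => rfl
  | [a] => rfl
  | [a, b] => simp only []; split <;> split <;> simp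
  | a :: b :: c :: r => rfl

theorem pv_round_fold_len (reach : List Bool) (rows : List (List Int)) :
    ∀ (new : List Bool), (rows.foldl (pvRoundStep reach) new).length = new.length := by
  induction rows with
  | nil => intro new; rfl
  | cons row rows ih =>
    intro new
    rw [List.foldl_cons, ih, pv_roundstep_len]

def pvAdjR (reach : List Bool) (rows : List (List Int)) (j : Nat) : Bool :=
  rows.any (fun row => match row with
    | [a, b] => (reach.getD (pvIdx a) false && (pvIdx b == j)) ||
        (reach.getD (pvIdx b) false && (pvIdx a == j))
    | _ => false)

theorem pvAdjR_iff (reach : List Bool) (rows : List (List Int)) (j : Nat)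
    (hpre : ∀ row ∈ rows, row.length = 2 ∧ ∀ x ∈ row, -101 ≤ x ∧ x ≤ 100) :
    pvAdjR reach rows j = true ↔
      ∃ a b, [a, b] ∈ rows ∧
        ((reach.getD (pvIdx a) false = true ∧ pvIdx b = j) ∨
         (reach.getD (pvIdx b) false = true ∧ pvIdx a = j)) := by
  unfold pvAdjR
  rw [List.any_eq_true]
  constructor
  · rintro ⟨row, hrow, hm⟩
    obtain ⟨a, b, rfl⟩ : ∃ a b, row = [a, b] := by
      match row, (hpre row hrow).1 with
      | [a, b], _ => exact ⟨a, b, rfl⟩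
    refine ⟨a, b, hrow, ?_⟩
    simp only [Bool.or_eq_true, Bool.and_eq_true, beq_iff_eq] at hm
    exact hm
  · rintro ⟨a, b, hmem, h⟩
    refine ⟨[a, b], hmem, ?_⟩
    simp only [Bool.or_eq_true, Bool.and_eq_true, beq_iff_eq]
    exact h

theorem pv_round_fold_getD (reach : List Bool) (rows : List (List Int))
    (hpre : ∀ row ∈ rows, row.length = 2 ∧ ∀ x ∈ row, -101 ≤ x ∧ x ≤ 100) :
    ∀ (new : List Bool), new.length = 101 → ∀ j : Nat,
      (rows.foldl (pvRoundStep reach) new).getD j false =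
        (new.getD j false || pvAdjR reach rows j) := by
  induction rows with
  | nil =>
    intro new hlen j
    simp [pvAdjR]
  | cons row rows ih =>
    intro new hlen j
    obtain ⟨hsh, hrg⟩ := hpre row List.mem_cons_self
    obtain ⟨a, b, rfl⟩ : ∃ a b, row = [a, b] := by
      match row, hsh with
      | [a, b], _ => exact ⟨a, b, rfl⟩
    have ha := hrg a (by simp)
    have hb := hrg b (by simp)
    have hia : pvIdx a < 101 := pvIdx_lt a ha.1 ha.2
    have hib : pvIdx b < 101 := pvIdx_lt b hb.1 hb.2
    rw [List.foldl_cons,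
      ih (fun r hr => hpre r (List.mem_cons_of_mem _ hr)) (pvRoundStep reach new [a, b])
        (by rw [pv_roundstep_len, hlen]) j]
    have hstep : (pvRoundStep reach new [a, b]).getD j false =
        (new.getD j false ||
          ((reach.getD (pvIdx a) false && (pvIdx b == j)) ||
           (reach.getD (pvIdx b) false && (pvIdx a == j)))) := by
      unfold pvRoundStep
      simp only []
      cases hA : reach.getD (pvIdx a) false <;> cases hB : reach.getD (pvIdx b) false
      · rw [if_neg (by simp), if_neg (by simp)]
        simp
      · rw [if_pos rfl, if_neg (by simp)]
        by_cases haj : pvIdx a = j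
        · subst haj
          rw [pv_getD_set_self _ _ _ _ (by rw [hlen]; exact hia)]
          simp
        · rw [pv_getD_set_ne _ _ _ _ _ haj]
          simp [haj]
      · rw [if_neg (by simp), if_pos rfl]
        by_cases hbj : pvIdx b = j
        · subst hbj
          rw [pv_getD_set_self _ _ _ _ (by rw [hlen]; exact hib)]
          simp
        · rw [pv_getD_set_ne _ _ _ _ _ hbj]
          simp [hbj]
      · rw [if_pos rfl, if_pos rfl]
        by_cases haj : pvIdx a = j
        · subst haj
          rw [pv_getD_set_self _ _ _ _ (by rw [List.length_set, hlen]; exact hia)]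
          simp
        · rw [pv_getD_set_ne _ _ _ _ _ haj]
          by_cases hbj : pvIdx b = j
          · subst hbj
            rw [pv_getD_set_self _ _ _ _ (by rw [hlen]; exact hib)]
            simp
          · rw [pv_getD_set_ne _ _ _ _ _ hbj]
            simp [haj, hbj]
    rw [hstep]
    have hcons : pvAdjR reach ([a, b] :: rows) j =
        (((reach.getD (pvIdx a) false && (pvIdx b == j)) ||
          (reach.getD (pvIdx b) false && (pvIdx a == j))) || pvAdjR reach rows j) := by
      simp [pvAdjR]
    rw [hcons, Bool.or_assoc]

theorem pv_round_len (rows : List (List Int)) (reach : List Bool) :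
    (pvRound rows reach).length = reach.length :=
  pv_round_fold_len reach rows reach

theorem pv_round_getD (rows : List (List Int)) (reach : List Bool)
    (hpre : ∀ row ∈ rows, row.length = 2 ∧ ∀ x ∈ row, -101 ≤ x ∧ x ≤ 100)
    (hlen : reach.length = 101) (j : Nat) :
    (pvRound rows reach).getD j false = (reach.getD j false || pvAdjR reach rows j) :=
  pv_round_fold_getD reach rows hpre reach hlen j


-- ---------- list access helpers ----------

theorem pv_getD_append_left {α : Type} (l t : List α) (i : Nat) (d : α) (h : i < l.length) :
    (l ++ t).getD i d = l.getD i d := by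
  simp [List.getD, List.getElem?_append_left h]

theorem pv_getD_snoc {α : Type} (l : List α) (x d : α) : (l ++ [x]).getD l.length d = x := by
  simp [List.getD, List.getElem?_append_right (le_refl l.length)]

-- reach counting: sum(reach) over the boolean table = number of nonnegative cells
theorem pv_count_reach (dist : List Int) :
    (pvReachOf dist).countP id = dist.countP (fun x => decide (0 ≤ x)) := by
  unfold pvReachOf
  rw [List.countP_map]
  rfl

-- ---------- the simulation: B's loop against the reference level BFS ----------

theorem pv_sim (rels : List (List Int)) (limit : Int)
    (hpre : ∀ row ∈ rels, row.length = 2 ∧ ∀ x ∈ row, -101 ≤ x ∧ x ≤ 100) :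
    ∀ (fuel : Nat) (d : Int) (dist F : List Int) (sizes : List Int),
      (limit - d).toNat = fuel → 0 ≤ d →
      dist.length = 101 →
      (sizes.length : Int) = d + 1 →
      (∀ j : Nat, j < 101 → dist.getD j 0 ≤ d) →
      (∀ u ∈ F, pvIdx u < 101 ∧ dist.getD (pvIdx u) 0 = d) →
      (∀ j : Nat, j < 101 → dist.getD j 0 = d → ∃ u ∈ F, pvIdx u = j) →
      (∀ a b, [a, b] ∈ rels →
        (0 ≤ dist.getD (pvIdx a) 0 → dist.getD (pvIdx a) 0 < d →
          0 ≤ dist.getD (pvIdx b) 0) ∧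
        (0 ≤ dist.getD (pvIdx b) 0 → dist.getD (pvIdx b) 0 < d →
          0 ≤ dist.getD (pvIdx a) 0)) →
      (∀ i : Nat, i < sizes.length →
        sizes.getD i 0 =
          ((pvLev (pvBuildGraph rels) limit dist F d).countP
            (fun x => decide (0 ≤ x ∧ x ≤ (i : Int))) : Int)) →
      ((∀ i : Nat, i < (pvLoopAlt rels limit (pvReachOf dist) sizes).length →
          (pvLoopAlt rels limit (pvReachOf dist) sizes).getD i 0 =
            ((pvLev (pvBuildGraph rels) limit dist F d).countP
              (fun x => decide (0 ≤ x ∧ x ≤ (i : Int))) : Int)) ∧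
        ((pvLev (pvBuildGraph rels) limit dist F d).countP
            (fun x => decide (0 ≤ x ∧
              x ≤ ((pvLoopAlt rels limit (pvReachOf dist) sizes).length : Int) - 1)) : Int)
          = ((pvLev (pvBuildGraph rels) limit dist F d).countP
              (fun x => decide (0 ≤ x)) : Int)) := by
  intro fuel
  induction fuel using Nat.strong_induction_on with
  | _ fuel ihf =>
    intro d dist F sizes hfuel hd0 hlen hslen hV hF1 hF2 hC hS
    rw [pvLoopAlt]
    by_cases hcond : (sizes.length : Int) - 1 < limit ∧
        (sizes.length < 2 ∨ sizes.getD (sizes.length - 1) 0 ≠ sizes.getD (sizes.length - 2) 0)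
    · rw [dif_pos hcond]
      simp only []
      have hd_lt : d < limit := by omega
      have hrlen : (pvReachOf dist).length = 101 := by rw [pvReachOf_length, hlen]
      by_cases hF : F = []
      · -- the old loop is stalled: the round is a no-op and the appended size repeats
        subst hF
        have hdfin : pvLev (pvBuildGraph rels) limit dist [] d = dist := by
          rw [pvLev, if_neg (by simp)]
        have hNoD : ∀ j : Nat, j < 101 → dist.getD j 0 ≠ d := by
          intro j hj hval
          obtain ⟨u, hu, _⟩ := hF2 j hj hval
          exact absurd hu (List.not_mem_nil)
        have hfix : pvRound rels (pvReachOf dist) = pvReachOf dist := by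
          apply pv_ext_getD
          · rw [pv_round_len, hrlen]
          · intro j
            rw [pv_round_getD rels (pvReachOf dist) hpre hrlen j]
            cases hAdj : pvAdjR (pvReachOf dist) rels j
            · simp
            · obtain ⟨a, b, hmem, hcase⟩ := (pvAdjR_iff _ _ _ hpre).mp hAdj
              obtain ⟨hsh, hrg⟩ := hpre [a, b] hmem
              have hia : pvIdx a < 101 := pvIdx_lt a (hrg a (by simp)).1 (hrg a (by simp)).2
              have hib : pvIdx b < 101 := pvIdx_lt b (hrg b (by simp)).1 (hrg b (by simp)).2
              have hreach_j : (pvReachOf dist).getD j false = true := by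
                rcases hcase with ⟨hr, rfl⟩ | ⟨hr, rfl⟩
                · rw [pvReachOf_getD_lt _ _ (by omega)] at hr
                  have h0a : 0 ≤ dist.getD (pvIdx a) 0 := by simpa using hr
                  have hlta : dist.getD (pvIdx a) 0 < d := by
                    have := hV (pvIdx a) hia
                    have := hNoD (pvIdx a) hia
                    omega
                  have h0b := (hC a b hmem).1 h0a hlta
                  rw [pvReachOf_getD_lt _ _ (by omega)]
                  simpa using h0b
                · rw [pvReachOf_getD_lt _ _ (by omega)] at hr
                  have h0b : 0 ≤ dist.getD (pvIdx b) 0 := by simpa using hr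
                  have hltb : dist.getD (pvIdx b) 0 < d := by
                    have := hV (pvIdx b) hib
                    have := hNoD (pvIdx b) hib
                    omega
                  have h0a := (hC a b hmem).2 h0b hltb
                  rw [pvReachOf_getD_lt _ _ (by omega)]
                  simpa using h0a
              rw [hreach_j]
              simp
        have hdfin1 : pvLev (pvBuildGraph rels) limit dist [] (d + 1) = dist := by
          rw [pvLev, if_neg (by simp)]
        have hcnt : ((pvRound rels (pvReachOf dist)).countP id : Int)
            = (dist.countP (fun x => decide (0 ≤ x)) : Int) := by
          rw [hfix, pv_count_reach]
        have hih := ihf ((limit - (d + 1)).toNat) (by omega) (d + 1) dist []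
          (sizes ++ [((pvRound rels (pvReachOf dist)).countP id : Int)])
          rfl (by omega) hlen (by simp; omega)
          (fun j hj => by have := hV j hj; omega)
          (fun u hu => absurd hu (List.not_mem_nil))
          (fun j hj hval => by have := hV j hj; omega)
          (fun a b hmem => by
            have h1 := hC a b hmem
            obtain ⟨hsh, hrg⟩ := hpre [a, b] hmem
            have hia : pvIdx a < 101 := pvIdx_lt a (hrg a (by simp)).1 (hrg a (by simp)).2
            have hib : pvIdx b < 101 := pvIdx_lt b (hrg b (by simp)).1 (hrg b (by simp)).2
            have hna := hNoD (pvIdx a) hia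
            have hnb := hNoD (pvIdx b) hib
            exact ⟨fun h0 hlt => (h1.1 h0 (by omega)),
                   fun h0 hlt => (h1.2 h0 (by omega))⟩)
          (by
            intro i hi
            rw [hdfin1]
            rw [List.length_append, List.length_cons, List.length_nil] at hi
            by_cases hilt : i < sizes.length
            · rw [pv_getD_append_left _ _ _ _ hilt]
              have := hS i hilt
              rwa [hdfin] at this
            · have hieq : i = sizes.length := by omega
              subst hieq
              rw [pv_getD_snoc]
              rw [hcnt]
              push_cast
              congr 1
              apply pv_countP_pointwise
              · rfl
              · intro k hk1 hk2
                have hk : k < 101 := by omega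
                have hvk := hV k hk
                rw [List.getD_eq_getElem _ _ hk1] at hvk
                have : (sizes.length : Int) = d + 1 := hslen
                simp only [decide_eq_decide]
                omega)
        rw [hdfin1, hfix] at hih
        rw [hfix, hdfin]
        exact hih
      · -- a real level: the round adds exactly the next BFS layer
        have hGF : pvLev (pvBuildGraph rels) limit dist F d
            = pvLev (pvBuildGraph rels) limit
                (F.foldl (fun st u => ((pvBuildGraph rels).getD (pvIdx u) []).foldl
                  (pvStepB (d + 1)) st) (dist, [])).1
                (F.foldl (fun st u => ((pvBuildGraph rels).getD (pvIdx u) []).foldl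
                  (pvStepB (d + 1)) st) (dist, [])).2
                (d + 1) := by
          rw [pvLev, if_pos ⟨hF, hd_lt⟩]
        set L := F.foldl (fun st u => ((pvBuildGraph rels).getD (pvIdx u) []).foldl
          (pvStepB (d + 1)) st) (dist, ([] : List Int)) with hLdef
        have hd1 : (0 : Int) < d + 1 := by omega
        have hlenL : L.1.length = 101 := by
          rw [hLdef, pv_lfold_len, hlen]
        have hcharL : ∀ j : Nat, L.1.getD j 0 =
            if 0 ≤ dist.getD j 0 then dist.getD j 0
            else if ∃ u ∈ F, ∃ v ∈ (pvBuildGraph rels).getD (pvIdx u) [], pvIdx v = j then d + 1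
            else dist.getD j 0 := by
          intro j
          rw [hLdef]
          exact pv_lfold_getD (pvBuildGraph rels) (d + 1) hd1 F dist [] j
        have hVL : ∀ j : Nat, j < 101 → L.1.getD j 0 ≤ d + 1 := by
          intro j hj
          have := hV j hj
          rw [hcharL j]
          split_ifs <;> omega
        have hF1L : ∀ u ∈ L.2, pvIdx u < 101 ∧ L.1.getD (pvIdx u) 0 = d + 1 := by
          intro u hu
          have hval : L.1.getD (pvIdx u) 0 = d + 1 := by
            rw [hLdef]
            exact pv_lfold_front_val (pvBuildGraph rels) (d + 1) hd1 F dist []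
              (by intro w hw; exact absurd hw List.not_mem_nil) u (by rw [hLdef] at hu; exact hu)
          refine ⟨?_, hval⟩
          by_contra hge
          rw [List.getD_eq_default _ _ (by omega)] at hval
          omega
        have hF2L : ∀ j : Nat, j < 101 → L.1.getD j 0 = d + 1 → ∃ u ∈ L.2, pvIdx u = j := by
          intro j hj hval
          rw [hLdef] at hval ⊢
          rcases pv_lfold_front_cover (pvBuildGraph rels) (d + 1) hd1 F dist [] j hval with h | h
          · have := hV j hj
            omega
          · exact h
        have hCL : ∀ a b, [a, b] ∈ rels →
            (0 ≤ L.1.getD (pvIdx a) 0 → L.1.getD (pvIdx a) 0 < d + 1 →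
              0 ≤ L.1.getD (pvIdx b) 0) ∧
            (0 ≤ L.1.getD (pvIdx b) 0 → L.1.getD (pvIdx b) 0 < d + 1 →
              0 ≤ L.1.getD (pvIdx a) 0) := by
          intro a b hmem
          obtain ⟨hsh, hrg⟩ := hpre [a, b] hmem
          have hia : pvIdx a < 101 := pvIdx_lt a (hrg a (by simp)).1 (hrg a (by simp)).2
          have hib : pvIdx b < 101 := pvIdx_lt b (hrg b (by simp)).1 (hrg b (by simp)).2
          constructor
          · intro h0 hlt
            have hcha := hcharL (pvIdx a)
            have h0a : 0 ≤ dist.getD (pvIdx a) 0 ∧ L.1.getD (pvIdx a) 0 = dist.getD (pvIdx a) 0 := by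
              split_ifs at hcha with h1 h2
              · exact ⟨h1, hcha⟩
              · omega
              · omega
            by_cases hda : dist.getD (pvIdx a) 0 < d
            · have h0b := (hC a b hmem).1 h0a.1 hda
              have hchb := hcharL (pvIdx b)
              rw [if_pos h0b] at hchb
              omega
            · have hdeq : dist.getD (pvIdx a) 0 = d := by
                have := hV (pvIdx a) hia
                omega
              obtain ⟨u, hu, hpu⟩ := hF2 (pvIdx a) hia hdeq
              have hmemg : b ∈ (pvBuildGraph rels).getD (pvIdx u) [] :=
                (pv_graph_mem rels hpre (pvIdx u) b).mpr ⟨a, b, hmem, Or.inl ⟨hpu.symm, rfl⟩⟩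
              have hchb := hcharL (pvIdx b)
              split_ifs at hchb with hb1 hb2
              · omega
              · omega
              · exact absurd ⟨u, hu, b, hmemg, rfl⟩ hb2
          · intro h0 hlt
            have hchb := hcharL (pvIdx b)
            have h0b : 0 ≤ dist.getD (pvIdx b) 0 ∧ L.1.getD (pvIdx b) 0 = dist.getD (pvIdx b) 0 := by
              split_ifs at hchb with h1 h2
              · exact ⟨h1, hchb⟩
              · omega
              · omega
            by_cases hdb : dist.getD (pvIdx b) 0 < d
            · have h0a := (hC a b hmem).2 h0b.1 hdb
              have hcha := hcharL (pvIdx a)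
              rw [if_pos h0a] at hcha
              omega
            · have hdeq : dist.getD (pvIdx b) 0 = d := by
                have := hV (pvIdx b) hib
                omega
              obtain ⟨u, hu, hpu⟩ := hF2 (pvIdx b) hib hdeq
              have hmemg : a ∈ (pvBuildGraph rels).getD (pvIdx u) [] :=
                (pv_graph_mem rels hpre (pvIdx u) a).mpr ⟨a, b, hmem, Or.inr ⟨hpu.symm, rfl⟩⟩
              have hcha := hcharL (pvIdx a)
              split_ifs at hcha with ha1 ha2
              · omega
              · omega
              · exact absurd ⟨u, hu, a, hmemg, rfl⟩ ha2
        have hADJ : ∀ j : Nat, j < 101 → dist.getD j 0 < 0 →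
            ((∃ u ∈ F, ∃ v ∈ (pvBuildGraph rels).getD (pvIdx u) [], pvIdx v = j)
              ↔ pvAdjR (pvReachOf dist) rels j = true) := by
          intro j hj h0
          constructor
          · rintro ⟨u, hu, v, hv, rfl⟩
            obtain ⟨hur, huv⟩ := hF1 u hu
            obtain ⟨a, b, hmem, hcase⟩ := (pv_graph_mem rels hpre (pvIdx u) v).mp hv
            apply (pvAdjR_iff _ _ _ hpre).mpr
            rcases hcase with ⟨hpa, rfl⟩ | ⟨hpb, rfl⟩
            · refine ⟨a, v, hmem, Or.inl ⟨?_, rfl⟩⟩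
              rw [hpa, pvReachOf_getD_lt dist _ (by omega)]
              simp only [decide_eq_true_eq]
              omega
            · refine ⟨v, b, hmem, Or.inr ⟨?_, rfl⟩⟩
              rw [hpb, pvReachOf_getD_lt dist _ (by omega)]
              simp only [decide_eq_true_eq]
              omega
          · intro hAdj
            obtain ⟨a, b, hmem, hcase⟩ := (pvAdjR_iff _ _ _ hpre).mp hAdj
            obtain ⟨hsh, hrg⟩ := hpre [a, b] hmem
            have hia : pvIdx a < 101 := pvIdx_lt a (hrg a (by simp)).1 (hrg a (by simp)).2
            have hib : pvIdx b < 101 := pvIdx_lt b (hrg b (by simp)).1 (hrg b (by simp)).2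
            rcases hcase with ⟨hr, rfl⟩ | ⟨hr, rfl⟩
            · rw [pvReachOf_getD_lt dist _ (by omega)] at hr
              have h0a : 0 ≤ dist.getD (pvIdx a) 0 := by simpa using hr
              have hdeq : dist.getD (pvIdx a) 0 = d := by
                by_contra hne
                have hlt : dist.getD (pvIdx a) 0 < d := by
                  have := hV (pvIdx a) hia
                  omega
                have := (hC a b hmem).1 h0a hlt
                omega
              obtain ⟨u, hu, hpu⟩ := hF2 (pvIdx a) hia hdeq
              exact ⟨u, hu, b,
                (pv_graph_mem rels hpre (pvIdx u) b).mpr ⟨a, b, hmem, Or.inl ⟨hpu.symm, rfl⟩⟩, rfl⟩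
            · rw [pvReachOf_getD_lt dist _ (by omega)] at hr
              have h0b : 0 ≤ dist.getD (pvIdx b) 0 := by simpa using hr
              have hdeq : dist.getD (pvIdx b) 0 = d := by
                by_contra hne
                have hlt : dist.getD (pvIdx b) 0 < d := by
                  have := hV (pvIdx b) hib
                  omega
                have := (hC a b hmem).2 h0b hlt
                omega
              obtain ⟨u, hu, hpu⟩ := hF2 (pvIdx b) hib hdeq
              exact ⟨u, hu, a,
                (pv_graph_mem rels hpre (pvIdx u) a).mpr ⟨a, b, hmem, Or.inr ⟨hpu.symm, rfl⟩⟩, rfl⟩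
        have hreach : pvReachOf L.1 = pvRound rels (pvReachOf dist) := by
          apply pv_ext_getD
          · rw [pvReachOf_length, hlenL, pv_round_len, hrlen]
          · intro j
            by_cases hj : j < 101
            · rw [pvReachOf_getD_lt L.1 j (by omega),
                pv_round_getD rels _ hpre hrlen j, hcharL j]
              by_cases h0 : 0 ≤ dist.getD j 0
              · rw [if_pos h0, pvReachOf_getD_lt dist j (by omega),
                  decide_eq_true h0]
                simp
              · rw [if_neg h0, pvReachOf_getD_lt dist j (by omega)]
                have hADJ' := hADJ j hj (by omega)
                by_cases hadj : ∃ u ∈ F, ∃ v ∈ (pvBuildGraph rels).getD (pvIdx u) [], pvIdx v = j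
                · rw [if_pos hadj, hADJ'.mp hadj]
                  have hdp : (0 : Int) ≤ d + 1 := by omega
                  simp [hdp]
                · rw [if_neg hadj]
                  have hfalse : pvAdjR (pvReachOf dist) rels j = false := by
                    cases h : pvAdjR (pvReachOf dist) rels j
                    · rfl
                    · exact absurd (hADJ'.mpr h) hadj
                  rw [hfalse]
                  simp [h0]
            · rw [pvReachOf_getD_ge L.1 j (by omega),
                pv_round_getD rels _ hpre hrlen j, pvReachOf_getD_ge dist j (by omega)]
              have hfalse : pvAdjR (pvReachOf dist) rels j = false := by
                cases h : pvAdjR (pvReachOf dist) rels j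
                · rfl
                · exfalso
                  obtain ⟨a, b, hmem, hcase⟩ := (pvAdjR_iff _ _ _ hpre).mp h
                  obtain ⟨hsh, hrg⟩ := hpre [a, b] hmem
                  have hia : pvIdx a < 101 := pvIdx_lt a (hrg a (by simp)).1 (hrg a (by simp)).2
                  have hib : pvIdx b < 101 := pvIdx_lt b (hrg b (by simp)).1 (hrg b (by simp)).2
                  rcases hcase with ⟨_, rfl⟩ | ⟨_, rfl⟩
                  · omega
                  · omega
              rw [hfalse]
              simp
        have hcnt : ((pvRound rels (pvReachOf dist)).countP id : Int)
            = (L.1.countP (fun x => decide (0 ≤ x)) : Int) := by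
          rw [← hreach, pv_count_reach]
        have hmono' := pv_lev_mono (pvBuildGraph rels) limit ((limit - (d + 1)).toNat)
          (d + 1) L.1 L.2 rfl (by omega)
        have hlev'len : (pvLev (pvBuildGraph rels) limit L.1 L.2 (d + 1)).length = 101 := by
          rw [pv_lev_len _ _ ((limit - (d + 1)).toNat) (d + 1) _ _ rfl, hlenL]
        have hS' : ∀ i : Nat,
            i < (sizes ++ [((pvRound rels (pvReachOf dist)).countP id : Int)]).length →
            (sizes ++ [((pvRound rels (pvReachOf dist)).countP id : Int)]).getD i 0 =
              ((pvLev (pvBuildGraph rels) limit L.1 L.2 (d + 1)).countP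
                (fun x => decide (0 ≤ x ∧ x ≤ (i : Int))) : Int) := by
          intro i hi
          rw [List.length_append, List.length_cons, List.length_nil] at hi
          by_cases hilt : i < sizes.length
          · rw [pv_getD_append_left _ _ _ _ hilt]
            have := hS i hilt
            rwa [hGF] at this
          · have hieq : i = sizes.length := by omega
            subst hieq
            rw [pv_getD_snoc, hcnt]
            push_cast
            congr 1
            apply pv_countP_pointwise
            · rw [hlev'len, hlenL]
            · intro k hk1 hk2
              have hk : k < 101 := by omega
              have hm := hmono' k
              rw [List.getD_eq_getElem _ _ hk2] at hm
              rw [List.getD_eq_getElem _ _ hk1] at hm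
              have hvk := hVL k hk
              rw [List.getD_eq_getElem _ _ hk1] at hvk
              have hcast : (sizes.length : Int) = d + 1 := hslen
              by_cases h0 : 0 ≤ L.1[k]
              · have := hm.1 h0
                simp only [decide_eq_decide]
                omega
              · rcases hm.2 (by omega) with h | h
                · simp only [decide_eq_decide]
                  omega
                · simp only [decide_eq_decide]
                  omega
        have hih := ihf ((limit - (d + 1)).toNat) (by omega) (d + 1) L.1 L.2
          (sizes ++ [((pvRound rels (pvReachOf dist)).countP id : Int)])
          rfl (by omega) hlenL (by simp; omega) hVL hF1L hF2L hCL hS'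
        rw [← hreach] at hih
        rw [hGF, ← hreach]
        exact hih
    · rw [dif_neg hcond]
      have hdist_eq : pvLev (pvBuildGraph rels) limit dist F d = dist := by
        by_cases hdl : d < limit
        · have hB : ¬(sizes.length < 2 ∨
              sizes.getD (sizes.length - 1) 0 ≠ sizes.getD (sizes.length - 2) 0) :=
            fun hb => hcond ⟨by omega, hb⟩
          push_neg at hB
          obtain ⟨hlen2, heq⟩ := hB
          have hF : F = [] := by
            by_contra hFne
            obtain ⟨u, hu⟩ := List.exists_mem_of_ne_nil F hFne
            obtain ⟨hur, huv⟩ := hF1 u hu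
            have hmono := (pv_lev_mono (pvBuildGraph rels) limit fuel d dist F hfuel hd0
              (pvIdx u)).1 (by omega)
            have hlenf : (pvLev (pvBuildGraph rels) limit dist F d).length = 101 := by
              rw [pv_lev_len _ _ fuel d _ _ hfuel, hlen]
            have hur' : pvIdx u < (pvLev (pvBuildGraph rels) limit dist F d).length := by omega
            have hxval : (pvLev (pvBuildGraph rels) limit dist F d)[pvIdx u] = d := by
              rw [← List.getD_eq_getElem _ 0 hur', hmono, huv]
            have hxmem := List.getElem_mem hur'
            rw [hxval] at hxmem
            have hS1 := hS (sizes.length - 1) (by omega)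
            have hS2 := hS (sizes.length - 2) (by omega)
            have hc1 : ((sizes.length - 1 : Nat) : Int) = d := by omega
            have hc2 : ((sizes.length - 2 : Nat) : Int) = d - 1 := by omega
            rw [hc1] at hS1
            rw [hc2] at hS2
            have hlt := pv_countP_lt (fun x => decide (0 ≤ x ∧ x ≤ d))
              (fun x => decide (0 ≤ x ∧ x ≤ d - 1))
              (pvLev (pvBuildGraph rels) limit dist F d) d hxmem
              (by simp; try omega) (by simp; try omega)
              (fun y hy => by simp at hy ⊢; omega)
            rw [heq] at hS1
            rw [hS1] at hS2
            have : (List.countP (fun x => decide (0 ≤ x ∧ x ≤ d))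
                  (pvLev (pvBuildGraph rels) limit dist F d) : Int)
                = (List.countP (fun x => decide (0 ≤ x ∧ x ≤ d - 1))
                  (pvLev (pvBuildGraph rels) limit dist F d) : Int) := hS2
            omega
          rw [pvLev, if_neg (by simp [hF])]
        · rw [pvLev, if_neg (fun h => hdl h.2)]
      refine ⟨hS, ?_⟩
      rw [hdist_eq]
      congr 1
      apply pv_countP_pointwise _ _ _ _ rfl
      intro k hk1 hk2
      have hk : k < 101 := by omega
      have hvk := hV k hk
      rw [List.getD_eq_getElem _ _ hk1] at hvk
      simp only [decide_eq_decide]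
      have : (sizes.length : Int) = d + 1 := hslen
      omega
-- the while loop only appends to sizes
theorem pv_loopAlt_prefix (rels : List (List Int)) (limit : Int) :
    ∀ (fuel : Nat) (reach : List Bool) (sizes : List Int),
      (limit - ((sizes.length : Int) - 1)).toNat = fuel →
      ∃ t, pvLoopAlt rels limit reach sizes = sizes ++ t := by
  intro fuel
  induction fuel using Nat.strong_induction_on with
  | _ fuel ihf =>
    intro reach sizes hfuel
    rw [pvLoopAlt]
    by_cases hcond : (sizes.length : Int) - 1 < limit ∧
        (sizes.length < 2 ∨ sizes.getD (sizes.length - 1) 0 ≠ sizes.getD (sizes.length - 2) 0)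
    · rw [dif_pos hcond]
      simp only []
      obtain ⟨t, ht⟩ := ihf
        ((limit - ((((sizes ++ [((pvRound rels reach).countP id : Int)]).length : Int)) - 1)).toNat)
        (by simp; omega) (pvRound rels reach)
        (sizes ++ [((pvRound rels reach).countP id : Int)]) rfl
      exact ⟨[((pvRound rels reach).countP id : Int)] ++ t, by rw [ht, List.append_assoc]⟩
    · rw [dif_neg hcond]
      exact ⟨[], by simp⟩

-- ===== VERDICT (by name: the statement is the Claim_ definition above) =====
theorem solution_spec : Claim_equal_solution := by
  intro rels target limit _hdom hpre
  obtain ⟨hrows, ht1, ht2⟩ := hpre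
  have hidx : pvIdx target < 101 := pvIdx_lt target ht1 ht2
  unfold Spec_solution solution solution_alt
  simp only []
  -- A's loop computes the weight of the level-BFS distance table
  have hc : pvCorr ((List.replicate 101 false).set (pvIdx target) true)
      ((List.replicate 101 (-1 : Int)).set (pvIdx target) 0) := by
    refine ⟨by simp, by simp, fun j hj => ?_⟩
    by_cases hji : pvIdx target = j
    · subst hji
      rw [pv_getD_set_self _ _ _ _ (by simpa using hidx),
        pv_getD_set_self _ _ _ _ (by simpa using hidx)]
      simp
    · rw [pv_getD_set_ne _ _ _ _ _ hji, pv_getD_set_ne _ _ _ _ _ hji,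
        List.getD_replicate _ hj, List.getD_replicate _ hj]
      simp
  have hw0 : (0 : Int) + 0
      = pvWeight ((List.replicate 101 (-1 : Int)).set (pvIdx target) 0) := by
    rw [pvWeight_set _ _ _ (by simpa using hidx), List.getD_replicate _ hidx]
    have h1 : pvWeight (List.replicate 101 (-1 : Int)) = 0 := by
      simp [pvWeight, pvW]
    norm_num [pvW, h1]
  have hmain := pv_main (pvBuildGraph rels) limit ((limit - 0).toNat) 0 [target]
    ((List.replicate 101 false).set (pvIdx target) true) 0 0
    ((List.replicate 101 (-1 : Int)).set (pvIdx target) 0) rfl le_rfl hc hw0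
  simp only [List.map_cons, List.map_nil] at hmain
  set dist0 := (List.replicate 101 (-1 : Int)).set (pvIdx target) 0 with hdist0
  have hlen0 : dist0.length = 101 := by simp [hdist0]
  have hget0 : ∀ j : Nat, j < 101 →
      dist0.getD j 0 = if pvIdx target = j then 0 else -1 := by
    intro j hj
    by_cases hji : pvIdx target = j
    · subst hji
      rw [hdist0, pv_getD_set_self _ _ _ _ (by simpa using hidx), if_pos rfl]
    · rw [hdist0, pv_getD_set_ne _ _ _ _ _ hji, List.getD_replicate _ hj, if_neg hji]
  have hreach0 : (List.replicate 101 false).set (pvIdx target) true = pvReachOf dist0 := by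
    apply pv_ext_getD
    · simp [pvReachOf_length, hlen0]
    · intro j
      by_cases hj : j < 101
      · rw [pvReachOf_getD_lt _ _ (by omega), hget0 j hj]
        by_cases hji : pvIdx target = j
        · subst hji
          rw [pv_getD_set_self _ _ _ _ (by simpa using hidx), if_pos rfl]
          simp
        · rw [pv_getD_set_ne _ _ _ _ _ hji, List.getD_replicate _ hj, if_neg hji]
          simp
      · rw [pvReachOf_getD_ge _ _ (by omega)]
        exact List.getD_eq_default _ _ (by simp; omega)
  by_cases hlim : limit < 1
  · rw [if_pos hlim]
    have hstop : pvLev (pvBuildGraph rels) limit dist0 [target] 0 = dist0 := by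
      rw [pvLev, if_neg (fun h => absurd h.2 (by omega))]
    rw [hmain, hstop]
    omega
  · rw [if_neg hlim]
    -- the distance table that the level BFS produces
    have hmono := pv_lev_mono (pvBuildGraph rels) limit ((limit - 0).toNat) 0 dist0 [target]
      rfl le_rfl
    have hlenf : (pvLev (pvBuildGraph rels) limit dist0 [target] 0).length = 101 := by
      rw [pv_lev_len _ _ ((limit - 0).toNat) 0 _ _ rfl, hlen0]
    have hN0 : ((pvLev (pvBuildGraph rels) limit dist0 [target] 0).countP
        (fun x => decide (0 ≤ x ∧ x ≤ (0 : Int))) : Int) = 1 := by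
      have hpt : (pvLev (pvBuildGraph rels) limit dist0 [target] 0).countP
          (fun x => decide (0 ≤ x ∧ x ≤ (0 : Int)))
          = dist0.countP (fun x => decide (0 ≤ x ∧ x ≤ (0 : Int))) := by
        apply pv_countP_pointwise _ _ _ _ (by rw [hlenf, hlen0])
        intro k hk1 hk2
        have hk : k < 101 := by omega
        have hm := hmono k
        rw [List.getD_eq_getElem _ _ hk1] at hm
        rw [List.getD_eq_getElem _ _ hk2] at hm
        have hg := hget0 k hk
        rw [List.getD_eq_getElem _ _ hk2] at hg
        by_cases hki : pvIdx target = k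
        · rw [if_pos hki] at hg
          have := hm.1 (by omega)
          simp only [decide_eq_decide]
          omega
        · rw [if_neg hki] at hg
          rcases hm.2 (by omega) with h | h
          · simp only [decide_eq_decide]
            omega
          · simp only [decide_eq_decide]
            omega
      rw [hpt, hdist0]
      have hset := List.countP_set (p := fun x : Int => decide (0 ≤ x ∧ x ≤ (0 : Int)))
        (l := List.replicate 101 (-1 : Int)) (i := pvIdx target) (a := 0) (by simpa using hidx)
      have hrep : (List.replicate 101 (-1 : Int)).countP
          (fun x => decide (0 ≤ x ∧ x ≤ (0 : Int))) = 0 := by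
        apply List.countP_eq_zero.mpr
        intro x hx
        rw [List.eq_of_mem_replicate hx]
        simp
      rw [hset]
      rw [hrep]
      simp
  -- apply the simulation
    have hsim := pv_sim rels limit hrows ((limit - 0).toNat) 0 dist0 [target] [1]
      rfl le_rfl hlen0 (by simp)
      (fun j hj => by
        by_cases hji : pvIdx target = j
        · rw [hget0 j hj, if_pos hji]
        · rw [hget0 j hj, if_neg hji]; omega)
      (fun u hu => by
        rcases List.mem_singleton.mp hu with rfl
        exact ⟨hidx, by rw [hget0 _ hidx, if_pos rfl]⟩)
      (fun j hj hval => by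
        by_cases hji : pvIdx target = j
        · exact ⟨target, List.mem_singleton_self _, hji⟩
        · rw [hget0 j hj, if_neg hji] at hval; omega)
      (fun a b hmem => ⟨fun h0 hlt => by omega, fun h0 hlt => by omega⟩)
      (by
        intro i hi
        have : i = 0 := by simpa using hi
        subst this
        simpa using hN0.symm)
    -- the loop runs at least one round, so the index-1 entry exists
    have hcond1 : ((([1] : List Int).length : Int) - 1 < limit ∧
        (([1] : List Int).length < 2 ∨
          ([1] : List Int).getD (([1] : List Int).length - 1) 0 ≠
            ([1] : List Int).getD (([1] : List Int).length - 2) 0)) := by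
      constructor
      · simp; omega
      · left; simp
    have hstep : pvLoopAlt rels limit (pvReachOf dist0) [1]
        = pvLoopAlt rels limit (pvRound rels (pvReachOf dist0))
            ([1] ++ [((pvRound rels (pvReachOf dist0)).countP id : Int)]) := by
      rw [pvLoopAlt, dif_pos hcond1]
    obtain ⟨t, ht⟩ := pv_loopAlt_prefix rels limit
      ((limit - ((((([1] : List Int) ++
          [((pvRound rels (pvReachOf dist0)).countP id : Int)]).length : Int)) - 1)).toNat)
      (pvRound rels (pvReachOf dist0))
      ([1] ++ [((pvRound rels (pvReachOf dist0)).countP id : Int)]) rfl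
    have hlen2 : 2 ≤ (pvLoopAlt rels limit (pvReachOf dist0) [1]).length := by
      rw [hstep, ht]
      simp
    rw [hreach0]
    rw [hreach0] at hmain
    set out := pvLoopAlt rels limit (pvReachOf dist0) [1] with hout
    set dfin := pvLev (pvBuildGraph rels) limit dist0 [target] 0 with hdfin
    have e0 := hsim.1 0 (by omega)
    have e1 := hsim.1 1 (by omega)
    have elast := hsim.1 (out.length - 1) (by omega)
    have hcast : ((out.length - 1 : Nat) : Int) = (out.length : Int) - 1 := by omega
    rw [hcast] at elast
    rw [hsim.2] at elast
    rw [hmain]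
    rw [e0, e1, elast]
    simp only [Nat.cast_zero, Nat.cast_one]
    -- count bookkeeping
    have hsplit2 : dfin.countP (fun x => decide (0 ≤ x ∧ x ≤ (1 : Int)))
        = dfin.countP (fun x => decide (0 ≤ x ∧ x ≤ (0 : Int)))
          + dfin.countP (fun x => decide (x = 1)) := by
      apply pv_countP_split
      · intro x
        by_cases h1 : 0 ≤ x ∧ x ≤ (1 : Int) <;> by_cases h2 : 0 ≤ x ∧ x ≤ (0 : Int) <;>
          by_cases h3 : x = (1 : Int) <;> simp [h1, h2, h3] <;> omega
      · intro x ⟨hx1, hx2⟩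
        simp at hx1 hx2
        omega
    have hsplit1 : dfin.countP (fun x => decide (0 ≤ x))
        = dfin.countP (fun x => decide (0 ≤ x ∧ x ≤ (1 : Int)))
          + dfin.countP (fun x => decide (2 ≤ x)) := by
      apply pv_countP_split
      · intro x
        by_cases h1 : (0 : Int) ≤ x <;> by_cases h2 : 0 ≤ x ∧ x ≤ (1 : Int) <;>
          by_cases h3 : (2 : Int) ≤ x <;> simp [h1, h2, h3] <;> omega
      · intro x ⟨hx1, hx2⟩
        simp at hx1 hx2
        omega
    have htally := pv_tally dfin
    have hbeq : dfin.countP (fun x => x == (1 : Int)) = dfin.countP (fun x => decide (x = 1)) := by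
      apply List.countP_congr
      intro x _
      simp
    rw [hbeq] at htally
    have hS01 : ((dfin.countP (fun x => decide (0 ≤ x ∧ x ≤ (0 : Int)))) : Int) = 1 := hN0
    push_cast at htally ⊢
    omega
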